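-- pv_equiv track=rewrite | github.com/steineman/SkelKIN | export_reduced_gri30_from_skn.py | choose_plot_species
-- ===== SOURCE A (Python) =====
-- PREFERRED_PLOT_SPECIES = ["CH4", "CO2", "H2", "CO", "O", "O2", "H", "H2O", "HO", "CH2O"]
--
-- def choose_plot_species(kept_species_names: list[str]) -> list[str]:
--     """Return a compact, human-readable concentration plot selection."""
--
--     kept_set = set(kept_species_names)
--     chosen = [species for species in PREFERRED_PLOT_SPECIES if species in kept_set]
--     if len(chosen) < min(10, len(kept_species_names)):
--         for species in kept_species_names:
--             if species not in chosen:
--                 chosen.append(species)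
--             if len(chosen) >= min(10, len(kept_species_names)):
--                 break
--     return chosen
-- ===== SOURCE B (Python) =====
-- PREFERRED_PLOT_SPECIES = ["CH4", "CO2", "H2", "CO", "O", "O2", "H", "H2O", "HO", "CH2O"]
--
-- def choose_plot_species(kept_species_names: list[str]) -> list[str]:
--     """Return a compact, human-readable concentration plot selection."""
--     kept_set = set(kept_species_names)
--     preferred = [s for s in PREFERRED_PLOT_SPECIES if s in kept_set]
--     merged = list(dict.fromkeys(preferred + kept_species_names))
--     return merged[:min(10, len(kept_species_names))]
-- ===== Notes on version B (the rewrite author's own statement) =====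
-- stated objective: simpler
-- what changed: A's conditional second loop with a running not-in-chosen check and a break once len(chosen) reaches min(10, len(kept)) is replaced by one order-preserving dedup of preferred+kept (dict.fromkeys) followed by a single slice to that cap.
import Mathlib
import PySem

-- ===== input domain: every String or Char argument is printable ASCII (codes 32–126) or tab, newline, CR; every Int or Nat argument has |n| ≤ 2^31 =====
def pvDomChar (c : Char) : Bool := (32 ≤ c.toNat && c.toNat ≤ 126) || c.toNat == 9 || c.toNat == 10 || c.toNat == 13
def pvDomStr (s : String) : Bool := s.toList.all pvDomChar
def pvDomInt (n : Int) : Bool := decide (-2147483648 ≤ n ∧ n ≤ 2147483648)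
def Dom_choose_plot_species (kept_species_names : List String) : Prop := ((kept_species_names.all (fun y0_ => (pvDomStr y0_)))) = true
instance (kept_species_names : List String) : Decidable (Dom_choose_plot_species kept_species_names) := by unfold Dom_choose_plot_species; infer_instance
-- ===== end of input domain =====

-- B replaces A's break-on-cap fallback loop by dedup of (preferred ++ kept) followed by one slice (objective: simpler).

-- ===== PORT A =====
def preferredPlotSpecies : List String := ["CH4", "CO2", "H2", "CO", "O", "O2", "H", "H2O", "HO", "CH2O"]

-- A's `for species in kept_species_names` loop with its `break` once len(chosen) >= cap
def choosePlotLoop (cap : Nat) : List String → List String → List String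
  | chosen, [] => chosen
  | chosen, s :: rest =>
    let chosen' := if chosen.contains s then chosen else chosen ++ [s]
    if cap ≤ chosen'.length then chosen' else choosePlotLoop cap chosen' rest

def choose_plot_species (kept_species_names : List String) : List String :=
  let kept_set := PySem.Set.ofList kept_species_names
  let chosen := preferredPlotSpecies.filter (fun s => PySem.Set.contains kept_set s)
  if chosen.length < min 10 kept_species_names.length then
    choosePlotLoop (min 10 kept_species_names.length) chosen kept_species_names
  else chosen

-- ===== PORT B =====
def choose_plot_species_alt (kept_species_names : List String) : List String :=
  let kept_set := PySem.Set.ofList kept_species_names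
  let preferred := preferredPlotSpecies.filter (fun s => PySem.Set.contains kept_set s)
  let merged := PySem.List.dedup (preferred ++ kept_species_names)   -- list(dict.fromkeys(…))
  PySem.List.slice merged none (some (min 10 (PySem.List.len kept_species_names)))   -- merged[:min(10, len(…))]

-- ===== PRECONDITION & SPEC =====
def Spec_choose_plot_species (kept_species_names : List String) (out : List String) : Prop := out = choose_plot_species_alt kept_species_names
instance (kept_species_names : List String) (out : List String) : Decidable (Spec_choose_plot_species kept_species_names out) := by unfold Spec_choose_plot_species; infer_instance

-- ===== CLAIM (what is proved, stated in full; the proofs are below) =====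
def Claim_equal_choose_plot_species : Prop := ∀ (kept_species_names : List String), Dom_choose_plot_species kept_species_names → Spec_choose_plot_species kept_species_names (choose_plot_species kept_species_names)

-- ===== LEMMAS AND PROOFS =====

-- Set.add only appends, so s is a prefix of Set.update s l
theorem update_prefix (s : PySem.Set String) (l : List String) : s <+: PySem.Set.update s l := by
  induction l generalizing s with
  | nil => exact List.prefix_refl s
  | cons x xs ih =>
    refine List.IsPrefix.trans ?_ (ih (PySem.Set.add s x))
    unfold PySem.Set.add
    split
    · exact List.prefix_refl s
    · exact List.prefix_append s [x]

-- A's fallback loop, entered with len(chosen) < cap, returns the first cap elements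
-- of chosen extended (in order, without duplicates) by the remaining names
theorem loop_eq_take (cap : Nat) (rest chosen : List String) (h : chosen.length < cap) :
    choosePlotLoop cap chosen rest = (PySem.Set.update chosen rest).take cap := by
  induction rest generalizing chosen with
  | nil =>
    simp [choosePlotLoop, PySem.Set.update, List.take_of_length_le (Nat.le_of_lt h)]
  | cons s rest ih =>
    have hbody : (if chosen.contains s then chosen else chosen ++ [s]) = PySem.Set.add chosen s := rfl
    have hupd : PySem.Set.update chosen (s :: rest) = PySem.Set.update (PySem.Set.add chosen s) rest := rfl
    have hlen : (PySem.Set.add chosen s).length ≤ chosen.length + 1 := by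
      unfold PySem.Set.add; split <;> simp
    rw [hupd]
    show (if cap ≤ (PySem.Set.add chosen s).length then PySem.Set.add chosen s
          else choosePlotLoop cap (PySem.Set.add chosen s) rest) = _
    by_cases hc : cap ≤ (PySem.Set.add chosen s).length
    · -- break: chosen just reached the cap, so it is exactly the first cap elements
      have hlen' : (PySem.Set.add chosen s).length = cap := Nat.le_antisymm (by omega) hc
      obtain ⟨t, ht⟩ := update_prefix (PySem.Set.add chosen s) rest
      rw [if_pos hc, ← ht, List.take_left' hlen']
    · rw [if_neg hc]
      exact ih (PySem.Set.add chosen s) (by omega)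

-- building a set from elements already present changes nothing; on a Nodup extension it appends them
theorem update_append_nodup (l s : List String) (h : (s ++ l).Nodup) : PySem.Set.update s l = s ++ l := by
  induction l generalizing s with
  | nil => simp [PySem.Set.update]
  | cons x xs ih =>
    have hx : x ∉ s := by
      intro hmem
      have := List.disjoint_of_nodup_append h
      exact this hmem (List.mem_cons_self ..)
    have hadd : PySem.Set.add s x = s ++ [x] := by
      unfold PySem.Set.add PySem.Set.contains
      rw [if_neg (by simpa using hx)]
    have hstep : PySem.Set.update s (x :: xs) = PySem.Set.update (s ++ [x]) xs := by
      show PySem.Set.update (PySem.Set.add s x) xs = _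
      rw [hadd]
    rw [hstep, ih (s ++ [x]) (by simpa using h), List.append_assoc]
    rfl

theorem ofList_self (l : List String) (h : l.Nodup) : PySem.Set.ofList l = l := by
  rw [PySem.Set.ofList_eq_foldl]
  simpa using update_append_nodup l [] (by simpa using h)

-- dedup of a concatenation = extend the set of the first part by the second
theorem dedup_append (a b : List String) :
    PySem.List.dedup (a ++ b) = PySem.Set.update (PySem.Set.ofList a) b := by
  rw [PySem.List.dedup_eq_ofList, PySem.Set.ofList_eq_foldl, List.foldl_append,
    ← PySem.Set.ofList_eq_foldl]
  rfl

-- ===== VERDICT (by name: the statement is the Claim_ definition above) =====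
theorem choose_plot_species_spec : Claim_equal_choose_plot_species := by
  intro kept _
  show choose_plot_species kept = choose_plot_species_alt kept
  unfold choose_plot_species choose_plot_species_alt
  set pref := preferredPlotSpecies.filter (fun s => PySem.Set.contains (PySem.Set.ofList kept) s) with hpref
  have hnodup : pref.Nodup := List.Nodup.filter _ (by decide)
  have hsub : pref ⊆ kept := by
    intro x hx
    have := (List.mem_filter.mp hx).2
    exact (PySem.Set.mem_ofList kept x).mp (by simpa [PySem.Set.contains, List.contains_iff_mem] using this)
  have hlen10 : pref.length ≤ 10 := List.length_filter_le _ _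
  have hlenk : pref.length ≤ kept.length :=
    (List.subperm_of_subset hnodup hsub).length_le
  -- B's slice is a take of min 10 (length kept)
  have hslice : PySem.List.slice (PySem.List.dedup (pref ++ kept)) none
      (some (min 10 (PySem.List.len kept)))
      = (PySem.Set.update pref kept).take (min 10 kept.length) := by
    have hmin : min 10 (PySem.List.len kept) = ((min 10 kept.length : Nat) : Int) := by
      simp [PySem.List.len_eq]
    rw [hmin, PySem.List.slice_to_natCast,
      dedup_append, ofList_self pref hnodup]
  rw [hslice]
  by_cases hlt : pref.length < min 10 kept.length
  · rw [if_pos hlt]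
    exact loop_eq_take _ kept pref hlt
  · rw [if_neg hlt]
    -- no fallback needed: pref already has exactly min 10 (length kept) elements
    have hcap : pref.length = min 10 kept.length := by omega
    obtain ⟨t, ht⟩ := update_prefix pref kept
    rw [← ht, List.take_left' hcap]
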